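-- pv_equiv track=rewrite | github.com/1wsslda/github-trend-radar | src/gitsonar/runtime/sqlite_migration.py | _safe_settings_keys
-- ===== SOURCE A (Python) =====
-- from typing import Any
--
-- SENSITIVE_SETTING_KEYS = {
--     "github_token",
--     "github_token_encrypted",
--     "proxy_url",
--     "proxy_url_encrypted",
--     "proxy",
--     "proxies",
-- }
--
-- def _clean_text(value: object) -> str:
--     return str(value or "").strip()
--
-- def _setting_is_sensitive(key: object) -> bool:
--     clean = _clean_text(key).lower()
--     return clean in SENSITIVE_SETTING_KEYS or "token" in clean or "proxy" in clean
--
-- def _safe_settings_keys(settings: dict[str, Any]) -> tuple[list[str], list[str]]: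
--     safe: list[str] = []
--     excluded: list[str] = []
--     for key in settings:
--         clean = _clean_text(key)
--         if not clean:
--             continue
--         if _setting_is_sensitive(clean):
--             excluded.append(clean)
--         else:
--             safe.append(clean)
--     return sorted(safe), sorted(excluded)
-- ===== SOURCE B (Python) =====
-- SENSITIVE_SETTING_KEYS = {
--     "github_token",
--     "github_token_encrypted",
--     "proxy_url",
--     "proxy_url_encrypted",
--     "proxy",
--     "proxies",
-- }
--
-- def _clean_text(value):
--     return str(value or "").strip()
--
-- def _setting_is_sensitive(key):
--     clean = _clean_text(key).lower()
--     return clean in SENSITIVE_SETTING_KEYS or "token" in clean or "proxy" in clean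
--
-- def _safe_settings_keys(settings):
--     cleaned = sorted(c for key in settings if (c := _clean_text(key)))
--     safe = [c for c in cleaned if not _setting_is_sensitive(c)]
--     excluded = [c for c in cleaned if _setting_is_sensitive(c)]
--     return safe, excluded
-- ===== Notes on version B (the rewrite author's own statement) =====
-- stated objective: alternative
-- what changed: B collects all cleaned non-empty keys, sorts that combined list once, and then partitions the sorted list by the sensitivity predicate, instead of classifying each key in the loop and sorting the two result lists separately.
import Mathlib
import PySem

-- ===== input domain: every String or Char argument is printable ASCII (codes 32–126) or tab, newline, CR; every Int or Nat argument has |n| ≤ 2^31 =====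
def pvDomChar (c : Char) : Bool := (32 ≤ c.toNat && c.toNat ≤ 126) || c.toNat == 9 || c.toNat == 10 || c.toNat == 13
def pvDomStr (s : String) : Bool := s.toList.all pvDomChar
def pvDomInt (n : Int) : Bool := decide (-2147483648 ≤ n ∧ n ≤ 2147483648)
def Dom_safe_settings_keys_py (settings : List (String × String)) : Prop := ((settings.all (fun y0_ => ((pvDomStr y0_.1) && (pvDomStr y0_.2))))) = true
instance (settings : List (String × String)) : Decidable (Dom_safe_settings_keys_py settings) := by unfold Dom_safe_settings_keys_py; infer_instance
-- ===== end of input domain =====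

-- B sorts the combined cleaned key list once and partitions it afterwards, instead of
-- classifying in-loop and sorting the two lists separately (objective: alternative).

-- ===== PORT A =====
-- shared helpers (identical in Source A and Source B)
def pvSensitiveKeys : List String :=
  ["github_token", "github_token_encrypted", "proxy_url", "proxy_url_encrypted", "proxy", "proxies"]

-- _clean_text: keys are strings, so `str(value or "")` is the string itself (or "" if empty); then .strip()
def cleanText (value : String) : String := PySem.Str.strip value

def settingIsSensitive (key : String) : Bool :=
  let clean := PySem.Str.lower (cleanText key)
  pvSensitiveKeys.contains clean || PySem.Str.isIn "token" clean || PySem.Str.isIn "proxy" clean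

-- `for key in settings` iterates the dict's keys: distinct keys in first-insertion order
def safe_settings_keys_py (settings : List (String × String)) : List String × List String :=
  let r := (PySem.List.dedup (settings.map Prod.fst)).foldl
    (fun (acc : List String × List String) key =>
      let clean := cleanText key
      if clean = "" then acc
      else if settingIsSensitive clean then (acc.1, acc.2 ++ [clean])
      else (acc.1 ++ [clean], acc.2))
    ([], [])
  (PySem.List.sorted r.1 (fun x => x) false, PySem.List.sorted r.2 (fun x => x) false)

-- ===== PORT B =====
def safe_settings_keys_py_alt (settings : List (String × String)) : List String × List String :=
  let cleaned := PySem.List.sorted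
    (((PySem.List.dedup (settings.map Prod.fst)).map cleanText).filter (fun c => decide (c ≠ "")))
    (fun x => x) false
  (cleaned.filter (fun c => !settingIsSensitive c), cleaned.filter (fun c => settingIsSensitive c))

-- ===== PRECONDITION & SPEC =====
def Spec_safe_settings_keys_py (settings : List (String × String)) (out : List String × List String) : Prop := out = safe_settings_keys_py_alt settings
instance (settings : List (String × String)) (out : List String × List String) : Decidable (Spec_safe_settings_keys_py settings out) := by unfold Spec_safe_settings_keys_py; infer_instance

-- ===== CLAIM (what is proved, stated in full; the proofs are below) =====
def Claim_equal_safe_settings_keys_py : Prop := ∀ (settings : List (String × String)), Dom_safe_settings_keys_py settings → Spec_safe_settings_keys_py settings (safe_settings_keys_py settings)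

-- ===== LEMMAS AND PROOFS =====

-- A's loop characterised: it appends the clean non-empty keys, split by sensitivity
theorem foldl_char (keys : List String) (acc : List String × List String) :
    keys.foldl
      (fun (acc : List String × List String) key =>
        let clean := cleanText key
        if clean = "" then acc
        else if settingIsSensitive clean then (acc.1, acc.2 ++ [clean])
        else (acc.1 ++ [clean], acc.2))
      acc
    = (acc.1 ++ ((keys.map cleanText).filter (fun c => decide (c ≠ ""))).filter
          (fun c => !settingIsSensitive c),
       acc.2 ++ ((keys.map cleanText).filter (fun c => decide (c ≠ ""))).filter
          (fun c => settingIsSensitive c)) := by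
  induction keys generalizing acc with
  | nil => simp
  | cons k t ih =>
    simp only [List.foldl_cons, List.map_cons, List.filter_cons]
    by_cases h0 : cleanText k = ""
    · simp [h0, ih]
    · by_cases hs : settingIsSensitive (cleanText k)
      · simp [h0, hs, ih]
      · simp [h0, hs, ih]

-- sorting a filtered list = filtering the sorted list (key = identity)
theorem sorted_filter (L : List String) (p : String → Bool) :
    PySem.List.sorted (L.filter p) (fun x => x) false
      = (PySem.List.sorted L (fun x => x) false).filter p := by
  apply PySem.List.sorted_id_eq_of_perm_of_pairwise
  · exact (PySem.List.sorted_perm L (fun x => x) false).filter p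
  · exact (PySem.List.sorted_pairwise L (fun x => x)).filter p

-- ===== VERDICT (by name: the statement is the Claim_ definition above) =====
theorem safe_settings_keys_py_spec : Claim_equal_safe_settings_keys_py := by
  intro settings _
  unfold Spec_safe_settings_keys_py safe_settings_keys_py safe_settings_keys_py_alt
  rw [foldl_char]
  simp only [List.nil_append]
  simp only [sorted_filter]
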